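-- pv_equiv track=rewrite | github.com/Great-R/QRcode-Generation | matrix.py | get_mask_patterns
-- ===== SOURCE A (Python) =====
-- def get_mask_patterns(mm_input):
--     """
--     Get mask patterns
--     mm_input: Base QR matrix (usually the state at the end of step 2, defining functional areas)
--               This function should not modify mm_input.
--     return: List of 8 mask patterns, each pattern same size as mm_input,
--              with 0 or 1 calculated according to mask formula only at positions where mm_input is None (data area).
--     """
--     mm = [row[:] for row in mm_input]
--
--     # Create mask template, marking data area and functional area
--     # Treat None positions in mm as data area, other functional areas remain 0 when generating mask patterns
--     data_area_mask_template = [[0] * len(mm[0]) for _ in range(len(mm))]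
--     for r in range(len(mm)):
--         for c in range(len(mm[r])):
--             if mm[r][c] is None:  # If it's data area
--                 data_area_mask_template[r][c] = None  # Mark as position needing mask value calculation
--             # Functional areas remain 0 in data_area_mask_template
--
--     # Define 8 mask formulas
--     def formula(i, row, column):
--         """
--         Implement 8 mask formulas defined in QR code standard
--         i: Mask pattern index (0-7)
--         row, column: Module coordinates
--         return: Whether the coordinate needs to be set to 1
--         """
--         if i == 0:  # (row + column) mod 2 == 0
--             return (row + column) % 2 == 0
--         elif i == 1:
--             return row % 2 == 0
--         elif i == 2:
--             return column % 3 == 0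
--         elif i == 3:
--             return (row + column) % 3 == 0
--         elif i == 4:
--             return (row // 2 + column // 3) % 2 == 0
--         elif i == 5:
--             return ((row * column) % 2) + ((row * column) % 3) == 0
--         elif i == 6:
--             return (((row * column) % 2) + ((row * column) % 3)) % 2 == 0
--         elif i == 7:
--             return     (((row + column) % 2) + ((row * column) % 3)) % 2 == 0
--
--     # Generate 8 mask patterns
--     mask_patterns_list = []
--     for i in range(8):
--         # Each mask pattern is based on data_area_mask_template
--         pattern = [row[:] for row in data_area_mask_template]
--
--         # Calculate mask value for each data area position according to current mask formula
--         for r in range(len(pattern)):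
--             for c in range(len(pattern[r])):
--                 if pattern[r][c] is None:  # Only calculate mask value in data area
--                     pattern[r][c] = 1 if formula(i, r, c) else 0
--                 # Functional areas remain 0
--
--         mask_patterns_list.append(pattern)
--
--     return mask_patterns_list
-- ===== SOURCE B (Python) =====
-- # B: all 8 mask formulas are periodic with period 12 in the row and 6 in the column,
-- # so a 12x6 table of 8-bit values (bit i = formula i) is precomputed once; the scan
-- # over the matrix packs all 8 masks into one small-int grid by table lookup (no
-- # formula evaluation per cell), then the 8 patterns are read off by bit extraction.
--
-- def _build_tile():
--     tile = []
--     for s in range(12):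
--         trow = []
--         for t in range(6):
--             v = 0
--             if (s + t) % 2 == 0:
--                 v |= 1
--             if s % 2 == 0:
--                 v |= 2
--             if t % 3 == 0:
--                 v |= 4
--             if (s + t) % 3 == 0:
--                 v |= 8
--             if (s // 2 + t // 3) % 2 == 0:
--                 v |= 16
--             if ((s * t) % 2) + ((s * t) % 3) == 0:
--                 v |= 32
--             if (((s * t) % 2) + ((s * t) % 3)) % 2 == 0:
--                 v |= 64
--             if (((s + t) % 2) + ((s * t) % 3)) % 2 == 0:
--                 v |= 128
--             trow.append(v)
--         tile.append(trow)
--     return tile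
--
--
-- TILE = _build_tile()
--
--
-- def get_mask_patterns(mm_input):
--     w = len(mm_input[0]) if mm_input else 0
--     packed = [[TILE[r % 12][c % 6]
--                if c < len(mm_input[r]) and mm_input[r][c] is None else 0
--                for c in range(w)]
--               for r in range(len(mm_input))]
--     return [[[(v >> i) & 1 for v in prow] for prow in packed] for i in range(8)]
-- ===== Notes on version B (the rewrite author's own statement) =====
-- stated objective: alternative
-- what changed: B exploits that all 8 mask formulas are periodic (period 12 in row, 6 in column): it precomputes a 12x6 table of bit-packed 8-bit values once, packs all 8 masks into a single small-int grid by table lookup in one scan (no formula evaluation per cell), then reads the 8 patterns off by bit extraction, instead of A's 8 separate template-copy-and-fill passes evaluating formulas per cell.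
import Mathlib
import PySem

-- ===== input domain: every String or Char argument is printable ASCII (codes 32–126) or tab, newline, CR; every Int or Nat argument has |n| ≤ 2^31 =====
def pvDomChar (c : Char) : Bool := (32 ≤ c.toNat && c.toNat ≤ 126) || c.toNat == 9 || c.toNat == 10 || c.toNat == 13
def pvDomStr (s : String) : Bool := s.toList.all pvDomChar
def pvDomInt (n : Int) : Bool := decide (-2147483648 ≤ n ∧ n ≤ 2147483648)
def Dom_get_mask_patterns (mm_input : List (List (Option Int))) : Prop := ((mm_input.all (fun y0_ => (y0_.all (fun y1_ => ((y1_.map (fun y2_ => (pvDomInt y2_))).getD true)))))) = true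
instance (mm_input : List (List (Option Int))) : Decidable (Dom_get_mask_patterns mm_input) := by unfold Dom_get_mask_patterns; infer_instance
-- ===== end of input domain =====

-- B replaces A's 8 template-copy-and-fill passes with per-cell formula evaluation by a
-- precomputed 12x6 bit-packed periodicity table, one packing scan and bit extraction
-- (objective: alternative).

-- ===== PORT A =====
-- Loop indices r, c, i are produced by range(), hence nonnegative; Nat %, / are exact
-- for Python's %, // on nonnegative operands.
def formulaA (i r c : Nat) : Bool :=
  if i = 0 then (r + c) % 2 == 0
  else if i = 1 then r % 2 == 0
  else if i = 2 then c % 3 == 0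
  else if i = 3 then (r + c) % 3 == 0
  else if i = 4 then (r / 2 + c / 3) % 2 == 0
  else if i = 5 then ((r * c) % 2) + ((r * c) % 3) == 0
  else if i = 6 then (((r * c) % 2) + ((r * c) % 3)) % 2 == 0
  else if i = 7 then (((r + c) % 2) + ((r * c) % 3)) % 2 == 0
  else false  -- Python returns None here; unreachable for i in range(8)

-- the inner 'for c in range(len(mm[r])): if mm[r][c] is None: template[r][c] = None' loop;
-- Lean's List.set is a no-op out of range where Python raises IndexError (excluded by Pre_)
def tmplRowA (w0 : Nat) (row : List (Option Int)) : List (Option Int) :=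
  (List.range row.length).foldl
    (fun acc c => if row.getD c (some 0) = none then acc.set c none else acc)
    (List.replicate w0 (some 0))

-- 'for c in range(len(pattern[r])): if pattern[r][c] is None: pattern[r][c] = 1 if formula(i,r,c) else 0'
def patRowA (i r : Nat) (trow : List (Option Int)) : List Int :=
  (List.range trow.length).map (fun c =>
    match trow.getD c (some 0) with
    | none => if formulaA i r c then 1 else 0
    | some v => v)

def get_mask_patterns (mm_input : List (List (Option Int))) : List (List (List Int)) :=
  let mm := mm_input
  let template := mm.map (tmplRowA ((mm.headD []).length))
  (List.range 8).map (fun i =>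
    (List.range template.length).map (fun r => patRowA i r (template.getD r [])))

-- ===== PORT B =====
-- the 8 'if …: v |= 1<<i' statements of _build_tile; the bits are disjoint, so |= is +
def pvPack (s t : Nat) : Nat :=
  (if (s + t) % 2 = 0 then 1 else 0)
  + (if s % 2 = 0 then 2 else 0)
  + (if t % 3 = 0 then 4 else 0)
  + (if (s + t) % 3 = 0 then 8 else 0)
  + (if (s / 2 + t / 3) % 2 = 0 then 16 else 0)
  + (if ((s * t) % 2) + ((s * t) % 3) = 0 then 32 else 0)
  + (if (((s * t) % 2) + ((s * t) % 3)) % 2 = 0 then 64 else 0)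
  + (if (((s + t) % 2) + ((s * t) % 3)) % 2 = 0 then 128 else 0)

-- TILE = _build_tile(); values are small nonnegative Python ints, ported as Nat (exact)
def pvTile : List (List Nat) :=
  (List.range 12).map (fun s => (List.range 6).map (fun t => pvPack s t))

def get_mask_patterns_alt (mm_input : List (List (Option Int))) : List (List (List Int)) :=
  let w := (mm_input.headD []).length  -- len(mm_input[0]) if mm_input else 0
  let packed : List (List Nat) :=
    (List.range mm_input.length).map (fun r =>
      (List.range w).map (fun c =>
        if c < (mm_input.getD r []).length ∧ (mm_input.getD r []).getD c (some 0) = none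
        then (pvTile.getD (r % 12) []).getD (c % 6) 0 else 0))
  (List.range 8).map (fun i =>
    packed.map (fun prow => prow.map (fun v => ((((v >>> i) &&& 1) : Nat) : Int))))

-- ===== PRECONDITION & SPEC =====
-- Pre_ excludes exactly the inputs where Python A raises IndexError: ragged matrices
-- with a None beyond the width of the first row (the assignment
-- data_area_mask_template[r][c] is out of range there); B returns the masks instead.
def Pre_get_mask_patterns (mm_input : List (List (Option Int))) : Prop :=
  ∀ row ∈ mm_input, ∀ c ∈ List.range row.length,
    row.getD c (some 0) = none → c < (mm_input.headD []).length
instance (mm_input : List (List (Option Int))) : Decidable (Pre_get_mask_patterns mm_input) := by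
  unfold Pre_get_mask_patterns; infer_instance

def pvWitness_get_mask_patterns : List (List (Option Int)) :=
  [[none, some 1], [some 0, none]]

def Spec_get_mask_patterns (mm_input : List (List (Option Int))) (out : List (List (List Int))) : Prop := out = get_mask_patterns_alt mm_input
instance (mm_input : List (List (Option Int))) (out : List (List (List Int))) : Decidable (Spec_get_mask_patterns mm_input out) := by unfold Spec_get_mask_patterns; infer_instance

-- ===== CLAIM (what is proved, stated in full; the proofs are below) =====
def Claim_equal_get_mask_patterns : Prop := ∀ (mm_input : List (List (Option Int))), Dom_get_mask_patterns mm_input → Pre_get_mask_patterns mm_input → Spec_get_mask_patterns mm_input (get_mask_patterns mm_input)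

-- ===== LEMMAS AND PROOFS =====

-- the template-building fold preserves the length of its accumulator
lemma tmpl_foldl_length (row : List (Option Int)) :
    ∀ (l : List Nat) (acc : List (Option Int)),
      (l.foldl (fun acc c => if row.getD c (some 0) = none then acc.set c none else acc) acc).length
        = acc.length := by
  intro l
  induction l with
  | nil => intro acc; rfl
  | cons x l ih =>
      intro acc
      simp only [List.foldl_cons]
      rw [ih]
      split <;> simp

lemma tmplRowA_length (w0 : Nat) (row : List (Option Int)) :
    (tmplRowA w0 row).length = w0 := by
  unfold tmplRowA
  rw [tmpl_foldl_length]
  simp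

-- entry c of the template row: none exactly at the row's None positions below w0
lemma tmplRowA_getElem? (w0 : Nat) (row : List (Option Int)) :
    ∀ (n : Nat), ∀ c < w0,
      ((List.range n).foldl
          (fun acc c => if row.getD c (some 0) = none then acc.set c none else acc)
          (List.replicate w0 (some 0)))[c]?
        = some (if c < n ∧ row.getD c (some 0) = none then (none : Option Int) else some 0) := by
  intro n
  induction n with
  | zero =>
      intro c hc
      simp [hc]
  | succ n ih =>
      intro c hc
      rw [List.range_succ, List.foldl_append, List.foldl_cons, List.foldl_nil]
      have hlen := tmpl_foldl_length row (List.range n) (List.replicate w0 (some 0))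
      rw [List.length_replicate] at hlen
      by_cases hn : row.getD n (some 0) = none
      · rw [if_pos hn]
        by_cases hcn : c = n
        · subst hcn
          rw [List.getElem?_set_self (by omega)]
          rw [if_pos ⟨by omega, hn⟩]
        · rw [List.getElem?_set_ne (fun h => hcn h.symm), ih c hc]
          congr 1
          by_cases hcr : row.getD c (some 0) = none
          · by_cases hlt : c < n
            · rw [if_pos ⟨hlt, hcr⟩, if_pos ⟨by omega, hcr⟩]
            · rw [if_neg (by tauto), if_neg (by rintro ⟨h1, _⟩; omega)]
          · rw [if_neg (by tauto), if_neg (by tauto)]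
      · rw [if_neg hn, ih c hc]
        congr 1
        by_cases hcr : row.getD c (some 0) = none
        · by_cases hlt : c < n
          · rw [if_pos ⟨hlt, hcr⟩, if_pos ⟨by omega, hcr⟩]
          · have hcn : c = n ∨ ¬ c < n + 1 := by omega
            rw [if_neg (by tauto)]
            rcases hcn with h | h
            · subst h; exact absurd hcr hn
            · rw [if_neg (by tauto)]
        · rw [if_neg (by tauto), if_neg (by tauto)]

lemma tmplRowA_getD (w0 : Nat) (row : List (Option Int)) (c : Nat) (hc : c < w0) :
    (tmplRowA w0 row).getD c (some 0)
      = if c < row.length ∧ row.getD c (some 0) = none then (none : Option Int) else some 0 := by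
  unfold tmplRowA
  rw [List.getD_eq_getElem?_getD, tmplRowA_getElem? w0 row row.length c hc]
  rfl

-- one pattern row of A in closed form
lemma patRowA_closed (w0 i r : Nat) (row : List (Option Int)) :
    patRowA i r (tmplRowA w0 row)
      = (List.range w0).map (fun c =>
          if c < row.length ∧ row.getD c (some 0) = none
          then (if formulaA i r c then (1 : Int) else 0) else 0) := by
  unfold patRowA
  rw [tmplRowA_length]
  apply List.map_congr_left
  intro c hc
  rw [List.mem_range] at hc
  rw [tmplRowA_getD w0 row c hc]
  by_cases hcase : c < row.length ∧ row.getD c (some 0) = none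
  · rw [if_pos hcase, if_pos hcase]
  · rw [if_neg hcase, if_neg hcase]

-- bit i of a packed tile entry is the i-th formula (finite check over 12*6*8 cases)
lemma pack_bit : ∀ s < 12, ∀ t < 6, ∀ i < 8,
    (pvPack s t >>> i) &&& 1 = (if formulaA i s t then 1 else 0) := by decide

lemma mul_mod2 (r c : Nat) : (r % 12) * (c % 6) % 2 = r * c % 2 := by
  conv_lhs => rw [Nat.mul_mod]
  rw [Nat.mod_mod_of_dvd _ (by norm_num), Nat.mod_mod_of_dvd _ (by norm_num), ← Nat.mul_mod]

lemma mul_mod3 (r c : Nat) : (r % 12) * (c % 6) % 3 = r * c % 3 := by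
  conv_lhs => rw [Nat.mul_mod]
  rw [Nat.mod_mod_of_dvd _ (by norm_num), Nat.mod_mod_of_dvd _ (by norm_num), ← Nat.mul_mod]

-- every formula is periodic: period 12 in the row, 6 in the column
lemma formulaA_period (i r c : Nat) (hi : i < 8) :
    formulaA i (r % 12) (c % 6) = formulaA i r c := by
  interval_cases i <;>
    norm_num only [formulaA] <;>
    (try simp only [if_true, if_false]) <;>
    (try rw [show (r % 12 + c % 6) % 2 = (r + c) % 2 from by omega]) <;>
    (try rw [show r % 12 % 2 = r % 2 from by omega]) <;>
    (try rw [show c % 6 % 3 = c % 3 from by omega]) <;>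
    (try rw [show (r % 12 + c % 6) % 3 = (r + c) % 3 from by omega]) <;>
    (try rw [show (r % 12 / 2 + c % 6 / 3) % 2 = (r / 2 + c / 3) % 2 from by omega]) <;>
    (try rw [mul_mod2]) <;>
    (try rw [mul_mod3])

-- tile lookup at (r % 12, c % 6) is pvPack (r % 12) (c % 6)
lemma tile_getD (r c : Nat) :
    (pvTile.getD (r % 12) []).getD (c % 6) 0 = pvPack (r % 12) (c % 6) := by
  have hr : r % 12 < 12 := Nat.mod_lt _ (by norm_num)
  have hc : c % 6 < 6 := Nat.mod_lt _ (by norm_num)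
  simp [pvTile, List.getD_eq_getElem?_getD, hr, hc]

theorem get_mask_patterns_spec : Claim_equal_get_mask_patterns := by
  intro mm _ _
  unfold Spec_get_mask_patterns get_mask_patterns get_mask_patterns_alt
  simp only [List.length_map]
  apply List.map_congr_left
  intro i hi
  rw [List.mem_range] at hi
  rw [List.map_map]
  apply List.map_congr_left
  intro r hr
  rw [List.mem_range] at hr
  have htmpl : (mm.map (tmplRowA ((mm.headD []).length))).getD r [] =
      tmplRowA ((mm.headD []).length) (mm.getD r []) := by
    simp [List.getD_eq_getElem?_getD, List.getElem?_map, List.getElem?_eq_getElem hr]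
  rw [htmpl, patRowA_closed]
  simp only [Function.comp, List.map_map]
  apply List.map_congr_left
  intro c _
  simp only [Function.comp_apply]
  by_cases hcase : c < (mm.getD r []).length ∧ (mm.getD r []).getD c (some 0) = none
  · rw [if_pos hcase, if_pos hcase, tile_getD,
        pack_bit (r % 12) (Nat.mod_lt _ (by norm_num)) (c % 6) (Nat.mod_lt _ (by norm_num)) i hi,
        formulaA_period i r c hi]
    by_cases hf : formulaA i r c <;> simp [hf]
  · rw [if_neg hcase, if_neg hcase]
    simp [Nat.zero_shiftRight]
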